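-- pv_equiv track=rewrite | github.com/opensourcex123/LeetCode | demo109 七进制数.py | convertBase7
-- ===== SOURCE A (Python) =====
-- def convertBase7(num):
--     if num==0:
--         return str(0)
--     is_negative=num<0
--     res=[]
--     num=abs(num)
--     while num>0:
--         num,remain=num//7,num%7
--         res.append(str(remain))
--     return '-'+''.join(res[::-1]) if is_negative else ''.join(res[::-1])
-- ===== SOURCE B (Python) =====
-- def convertBase7(num):
--     if num < 0:
--         return '-' + convertBase7(-num)
--     if num < 7:
--         return str(num)
--     return convertBase7(num // 7) + str(num % 7)
-- ===== Notes on version B (the rewrite author's own statement) =====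
-- stated objective: simpler
-- what changed: Replaced the while-loop that collects remainder digits in a list and then reverses and joins them with a direct recursion on num//7 that emits digits in natural order, removing the list, the reversal and the join.
import Mathlib
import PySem

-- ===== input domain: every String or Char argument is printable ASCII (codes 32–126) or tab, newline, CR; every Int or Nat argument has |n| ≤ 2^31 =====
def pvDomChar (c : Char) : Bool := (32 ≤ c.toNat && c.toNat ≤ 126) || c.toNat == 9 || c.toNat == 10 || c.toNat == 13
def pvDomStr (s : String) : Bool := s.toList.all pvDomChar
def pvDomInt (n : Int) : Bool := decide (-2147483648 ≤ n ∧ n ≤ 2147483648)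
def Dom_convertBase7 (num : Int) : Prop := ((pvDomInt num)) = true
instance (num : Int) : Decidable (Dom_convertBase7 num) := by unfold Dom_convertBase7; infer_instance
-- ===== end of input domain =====

-- B replaces A's digit-list-then-reverse-and-join loop by a direct recursion on num//7 that
-- emits digits in natural order (objective: simpler).

-- ===== PORT A =====
-- the while loop: num, res are the loop state; appends str(num % 7), continues with num // 7
def convertBase7Loop (num : Int) (res : List String) : List String :=
  if _h : num > 0 then
    convertBase7Loop (PySem.Int.floordiv num 7) (res ++ [PySem.Int.toStr (PySem.Int.mod num 7)])
  else res
termination_by num.toNat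
decreasing_by
  rw [PySem.Int.floordiv_eq_ediv_of_pos (by omega)]
  have h1 : num / 7 < num := Int.ediv_lt_of_lt_mul (by omega) (by nlinarith)
  have h2 : 0 ≤ num / 7 := Int.ediv_nonneg (by omega) (by omega)
  omega

def convertBase7 (num : Int) : String :=
  if num = 0 then PySem.Int.toStr 0
  else
    let isNegative := num < 0
    let res := convertBase7Loop |num| []
    if isNegative then "-" ++ PySem.Str.join "" res.reverse
    else PySem.Str.join "" res.reverse

-- ===== PORT B =====
def convertBase7_alt (num : Int) : String :=
  if num < 0 then "-" ++ convertBase7_alt (-num)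
  else if num < 7 then PySem.Int.toStr num
  else convertBase7_alt (PySem.Int.floordiv num 7) ++ PySem.Int.toStr (PySem.Int.mod num 7)
termination_by (if num < 0 then num.natAbs + 1 else num.toNat)
decreasing_by
  · simp only [if_neg (by omega : ¬ (-num < 0))]
    split <;> omega
  · rw [PySem.Int.floordiv_eq_ediv_of_pos (by omega)]
    have h1 : num / 7 < num := Int.ediv_lt_of_lt_mul (by omega) (by nlinarith)
    have h2 : 0 ≤ num / 7 := Int.ediv_nonneg (by omega) (by omega)
    simp only [if_neg (by omega : ¬ (num / 7 < 0)), if_neg (by omega : ¬ (num < 0))]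
    omega

-- ===== PRECONDITION & SPEC =====
def Spec_convertBase7 (num : Int) (out : String) : Prop := out = convertBase7_alt num
instance (num : Int) (out : String) : Decidable (Spec_convertBase7 num out) := by unfold Spec_convertBase7; infer_instance

-- ===== CLAIM (what is proved, stated in full; the proofs are below) =====
def Claim_equal_convertBase7 : Prop := ∀ (num : Int), Dom_convertBase7 num → Spec_convertBase7 num (convertBase7 num)

-- ===== LEMMAS AND PROOFS =====

theorem chars_join_nil : ∀ (l : List (List Char)), PySem.Chars.join [] l = l.flatten := by
  intro l
  induction l with
  | nil => simp [PySem.Chars.join_nil]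
  | cons a rest ih =>
    cases rest with
    | nil => simp [PySem.Chars.join_singleton]
    | cons b r => rw [PySem.Chars.join_cons_cons] at *; simp_all

theorem loop_acc : ∀ (k : Nat) (num : Int), num.toNat ≤ k → ∀ (acc : List String),
    convertBase7Loop num acc = acc ++ convertBase7Loop num [] := by
  intro k
  induction k with
  | zero =>
    intro num hk acc
    rw [convertBase7Loop, dif_neg (by omega), convertBase7Loop, dif_neg (by omega),
        List.append_nil]
  | succ k ih =>
    intro num hk acc
    by_cases h : num > 0
    · have hq := Int.ediv_lt_of_lt_mul (by omega : (0:Int) < 7) (by nlinarith : num < num * 7)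
      have hq0 : 0 ≤ num / 7 := Int.ediv_nonneg (by omega) (by omega)
      have hfd : PySem.Int.floordiv num 7 = num / 7 :=
        PySem.Int.floordiv_eq_ediv_of_pos (by omega)
      have hk' : (PySem.Int.floordiv num 7).toNat ≤ k := by rw [hfd]; omega
      conv_lhs => rw [convertBase7Loop]
      conv_rhs => rw [convertBase7Loop]
      rw [dif_pos h, dif_pos h, List.nil_append, ih _ hk',
          ih _ hk' [PySem.Int.toStr (PySem.Int.mod num 7)], List.append_assoc]
    · rw [convertBase7Loop, dif_neg h, convertBase7Loop, dif_neg h, List.append_nil]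

theorem join_loop_aux : ∀ (k : Nat) (num : Int), num.toNat ≤ k → 0 < num →
    PySem.Str.join "" (convertBase7Loop num []).reverse = convertBase7_alt num := by
  intro k
  induction k with
  | zero => intro num hk h; omega
  | succ k ih =>
    intro num hk h
    have hfd : PySem.Int.floordiv num 7 = num / 7 :=
      PySem.Int.floordiv_eq_ediv_of_pos (by omega)
    have hlt : num / 7 < num := Int.ediv_lt_of_lt_mul (by omega : (0:Int) < 7) (by nlinarith : num < num * 7)
    have hnn : 0 ≤ num / 7 := Int.ediv_nonneg (by omega) (by omega)
    have hk' : (PySem.Int.floordiv num 7).toNat ≤ k := by rw [hfd]; omega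
    rw [convertBase7Loop, dif_pos h, List.nil_append, loop_acc k _ hk']
    by_cases h7 : num < 7
    · have hq : PySem.Int.floordiv num 7 = 0 := by rw [hfd]; omega
      have hm : PySem.Int.mod num 7 = num := by
        rw [PySem.Int.mod_eq_emod_of_pos (by omega)]; omega
      rw [hq, hm, convertBase7Loop]
      simp only [gt_iff_lt, lt_irrefl, dite_false, List.nil_append]
      rw [convertBase7_alt, if_neg (by omega), if_pos h7]
      simp [PySem.Str.join]
      rw [← PySem.Int.toList_toStr, String.ofList_toList]
    · have hq : 0 < PySem.Int.floordiv num 7 := by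
        rw [hfd]
        have : 1 ≤ num / 7 := by rw [Int.le_ediv_iff_mul_le (by omega)]; omega
        omega
      rw [List.reverse_append, List.reverse_singleton, convertBase7_alt,
          if_neg (by omega), if_neg (by omega), ← ih _ hk' hq]
      simp only [PySem.Str.join, hfd, show ("" : String).toList = ([] : List Char) from rfl,
        chars_join_nil, List.map_append, List.map_reverse,
        List.flatten_append, List.flatten_cons, List.flatten_nil, List.append_nil,
        List.map_cons, List.map_nil]
      rw [String.ofList_append, String.ofList_toList]

theorem join_loop (num : Int) (h : 0 < num) :
    PySem.Str.join "" (convertBase7Loop num []).reverse = convertBase7_alt num :=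
  join_loop_aux num.toNat num le_rfl h

theorem eq_all (num : Int) : convertBase7 num = convertBase7_alt num := by
  rcases lt_trichotomy num 0 with h | h | h
  · rw [convertBase7, if_neg (by omega)]
    simp only [if_pos h, abs_of_neg h]
    rw [join_loop (-num) (by omega)]
    conv_rhs => rw [convertBase7_alt, if_pos h]
  · subst h
    rw [convertBase7, if_pos rfl]
    conv_rhs => rw [convertBase7_alt, if_neg (by omega), if_pos (by omega)]
  · rw [convertBase7, if_neg (by omega)]
    simp only [if_neg (by omega : ¬ num < 0), abs_of_pos h]
    exact join_loop num h

-- ===== VERDICT (by name: the statement is the Claim_ definition above) =====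
theorem convertBase7_spec : Claim_equal_convertBase7 := by
  intro num _
  exact eq_all num
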